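-- pv_equiv track=rewrite | github.com/pabloschwarzenberg/grader | hito2_ej2/hito2_ej2_cc9c10b6c15e482127e9732028c12fdc.py | validarSecuencia
-- ===== SOURCE A (Python) =====
-- def validarSecuencia(secuencia):
--   letrasNoValidas = "bdefhijklmnopqrsuvwxyz"
--   valido = True
--   for i in range(len(letrasNoValidas)):
--       if(secuencia.find(letrasNoValidas[i]) != -1):
--         valido=False
--
--   resultado=""
--   if(valido):
--    resultado="Secuencia Correcta"
--   else:
--     resultado="Secuencia Incorrecta"
--
--   return resultado
-- ===== SOURCE B (Python) =====
-- def validarSecuencia(secuencia):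
--     invalidas = set("bdefhijklmnopqrsuvwxyz")
--     valido = not any(c in invalidas for c in secuencia)
--     return "Secuencia Correcta" if valido else "Secuencia Incorrecta"
-- ===== Notes on version B (the rewrite author's own statement) =====
-- stated objective: idiomatic
-- what changed: Instead of scanning the whole input string once per each of the 22 invalid letters via str.find, B does a single pass over the input's characters testing membership in a set of invalid letters.
import Mathlib
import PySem

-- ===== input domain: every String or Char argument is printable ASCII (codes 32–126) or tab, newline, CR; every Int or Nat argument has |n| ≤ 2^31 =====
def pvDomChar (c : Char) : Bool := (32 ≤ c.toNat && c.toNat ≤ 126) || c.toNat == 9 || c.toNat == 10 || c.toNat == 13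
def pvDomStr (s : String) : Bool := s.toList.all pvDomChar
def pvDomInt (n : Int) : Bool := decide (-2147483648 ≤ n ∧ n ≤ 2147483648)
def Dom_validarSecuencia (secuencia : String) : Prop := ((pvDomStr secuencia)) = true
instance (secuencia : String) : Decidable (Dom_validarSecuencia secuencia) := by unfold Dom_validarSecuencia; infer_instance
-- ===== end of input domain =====

-- B replaces A's 22 repeated str.find scans of the input by one pass over the
-- input's characters testing membership in a set of invalid letters (idiomatic).


-- ===== PORT A =====
-- for i in range(len(letrasNoValidas)): if secuencia.find(letrasNoValidas[i]) != -1: valido = False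
-- letrasNoValidas[i] is always in range, so the total pyGetD is exact here.
def validarSecuencia (secuencia : String) : String :=
  let letrasNoValidas := "bdefhijklmnopqrsuvwxyz"
  let valido :=
    (PySem.List.pyRange 0 (PySem.Str.len letrasNoValidas) 1).foldl
      (fun valido i =>
        if PySem.Str.find secuencia
            (String.ofList [PySem.List.pyGetD letrasNoValidas.toList i ' ']) ≠ -1 then
          false
        else valido) true
  let resultado := ""
  let resultado := if valido then "Secuencia Correcta" else "Secuencia Incorrecta"
  resultado

-- ===== PORT B =====
def validarSecuencia_alt (secuencia : String) : String :=
  let invalidas : PySem.Set Char := PySem.Set.ofList "bdefhijklmnopqrsuvwxyz".toList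
  let valido := !(secuencia.toList.any (fun c => PySem.Set.contains invalidas c))
  if valido then "Secuencia Correcta" else "Secuencia Incorrecta"

-- ===== PRECONDITION & SPEC =====
def Spec_validarSecuencia (secuencia : String) (out : String) : Prop := out = validarSecuencia_alt secuencia
instance (secuencia : String) (out : String) : Decidable (Spec_validarSecuencia secuencia out) := by unfold Spec_validarSecuencia; infer_instance

-- ===== CLAIM (what is proved, stated in full; the proofs are below) =====
def Claim_equal_validarSecuencia : Prop := ∀ (secuencia : String), Dom_validarSecuencia secuencia → Spec_validarSecuencia secuencia (validarSecuencia secuencia)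

-- ===== LEMMAS AND PROOFS =====

-- A's 'flag set to False on hit' loop is the negation of an existence test.
theorem foldl_flag_eq_not_any {α : Type} (p : α → Prop) [DecidablePred p] (l : List α) (b : Bool) :
    l.foldl (fun v x => if p x then false else v) b
      = (b && !(l.any (fun x => decide (p x)))) := by
  induction l generalizing b with
  | nil => simp
  | cons x xs ih =>
    simp only [List.foldl_cons, List.any_cons, ih]
    by_cases hp : p x <;> simp [hp]

theorem singleton_infix_iff_mem {α : Type} (a : α) (l : List α) : [a] <:+: l ↔ a ∈ l := by
  constructor
  · intro h
    exact (List.singleton_sublist).1 h.sublist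
  · intro h
    obtain ⟨s, t, rfl⟩ := List.append_of_mem h
    exact ⟨s, t, by simp⟩

theorem validarSecuencia_spec : Claim_equal_validarSecuencia := by
  intro sec _
  unfold Spec_validarSecuencia validarSecuencia validarSecuencia_alt
  dsimp only
  have hlen : PySem.Str.len "bdefhijklmnopqrsuvwxyz"
      = PySem.List.len ("bdefhijklmnopqrsuvwxyz".toList) := by decide
  rw [hlen]
  have hfold :
      List.foldl
        (fun (valido : Bool) (i : Int) =>
          if PySem.Str.find sec
              (String.ofList [PySem.List.pyGetD "bdefhijklmnopqrsuvwxyz".toList i ' ']) ≠ -1 then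
            false
          else valido) true
        (PySem.List.pyRange 0 (PySem.List.len "bdefhijklmnopqrsuvwxyz".toList))
      = List.foldl
          (fun (v : Bool) (c : Char) =>
            if PySem.Str.find sec (String.ofList [c]) ≠ -1 then false else v) true
          "bdefhijklmnopqrsuvwxyz".toList :=
    PySem.List.foldl_pyRange_zero_pyGetD "bdefhijklmnopqrsuvwxyz".toList ' '
      (fun (v : Bool) (c : Char) =>
        if PySem.Str.find sec (String.ofList [c]) ≠ -1 then false else v) true
  rw [hfold]
  rw [foldl_flag_eq_not_any (fun c => PySem.Str.find sec (String.ofList [c]) ≠ -1)]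
  have hany : ("bdefhijklmnopqrsuvwxyz".toList.any
        (fun c => decide (PySem.Str.find sec (String.ofList [c]) ≠ -1)))
      = (sec.toList.any (fun c =>
          PySem.Set.contains (PySem.Set.ofList "bdefhijklmnopqrsuvwxyz".toList) c)) := by
    rw [Bool.eq_iff_iff]
    simp only [List.any_eq_true, decide_eq_true_eq, PySem.Str.find_ne_neg_one_iff,
      PySem.Set.contains, List.contains_eq_mem, PySem.Set.mem_ofList]
    constructor
    · rintro ⟨c, hc, hinf⟩
      have : c ∈ sec.toList := (singleton_infix_iff_mem c sec.toList).1 (by simpa using hinf)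
      exact ⟨c, this, hc⟩
    · rintro ⟨c, hc, hmem⟩
      exact ⟨c, hmem, by simpa using (singleton_infix_iff_mem c sec.toList).2 hc⟩
  rw [hany]
  simp

-- ===== VERDICT (by name: the statement is the Claim_ definition above) =====
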